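-- pv_equiv track=rewrite | github.com/MicahelGrayeb/Komunah | Comuna/app/utils/datos_proveedores.py | _normalizar_lista_entrada
-- ===== SOURCE A (Python) =====
-- from typing import List
--
-- def _normalizar_lista_entrada(valores: List[str]) -> List[str]:
--     """Normaliza entradas que pueden venir como lista o CSV dentro de cada item."""
--     salida: List[str] = []
--     for item in (valores or []):
--         for parte in str(item).replace(";", ",").split(","):
--             limpio = parte.strip()
--             if limpio:
--                 salida.append(limpio)
--     return salida
-- ===== SOURCE B (Python) =====
-- from typing import List
--
-- def _normalizar_lista_entrada(valores: List[str]) -> List[str]: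
--     """Normaliza entradas que pueden venir como lista o CSV dentro de cada item."""
--     salida: List[str] = []
--     for item in (valores or []):
--         buf = ""
--         for ch in str(item):
--             if ch == "," or ch == ";":
--                 t = buf.strip()
--                 if t:
--                     salida.append(t)
--                 buf = ""
--             else:
--                 buf += ch
--         t = buf.strip()
--         if t:
--             salida.append(t)
--     return salida
-- ===== Notes on version B (the rewrite author's own statement) =====
-- stated objective: alternative
-- what changed: Replaces A's replace-then-split string pipeline with a character-level state machine: one scan over the characters maintaining an explicit token buffer, flushing the stripped buffer at each ',' or ';' and at item end, so no intermediate replaced/split strings are ever built.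
import Mathlib
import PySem

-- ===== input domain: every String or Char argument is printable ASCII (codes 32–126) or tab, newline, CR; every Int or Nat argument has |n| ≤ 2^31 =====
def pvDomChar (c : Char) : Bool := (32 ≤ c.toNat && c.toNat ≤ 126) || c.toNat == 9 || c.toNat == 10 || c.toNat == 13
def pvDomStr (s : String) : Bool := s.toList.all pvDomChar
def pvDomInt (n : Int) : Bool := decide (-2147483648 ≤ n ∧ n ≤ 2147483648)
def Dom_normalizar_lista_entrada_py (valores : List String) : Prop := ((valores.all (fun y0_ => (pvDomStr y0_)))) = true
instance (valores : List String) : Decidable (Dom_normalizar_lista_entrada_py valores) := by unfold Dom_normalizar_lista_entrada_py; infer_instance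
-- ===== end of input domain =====

-- B replaces A's replace-then-split pipeline with a character-level state machine (explicit token buffer flushed at ','/';' and item end); objective: alternative decomposition, same cost.


-- ===== PORT A =====
-- literal port of A: for each item, replace ';'→',', split on ',', strip each part, append the non-empty ones
def normalizar_lista_entrada_py (valores : List String) : List String :=
  valores.foldl (fun salida item =>
    (PySem.Chars.splitOn (PySem.Chars.replace item.toList [';'] [',']) [',']).foldl
      (fun salida parte =>
        let limpio := PySem.Chars.strip parte
        if limpio ≠ [] then salida ++ [String.ofList limpio] else salida)
      salida) []

-- ===== PORT B =====
-- port of B: per-item character scan with a token buffer; flush the stripped buffer at ','/';' and at item end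
def pvScanStep (st : List String × List Char) (ch : Char) : List String × List Char :=
  if ch = ',' ∨ ch = ';' then
    let t := PySem.Chars.strip st.2
    (if t ≠ [] then st.1 ++ [String.ofList t] else st.1, [])
  else
    (st.1, st.2 ++ [ch])

def pvFlush (st : List String × List Char) : List String :=
  let t := PySem.Chars.strip st.2
  if t ≠ [] then st.1 ++ [String.ofList t] else st.1

def normalizar_lista_entrada_py_alt (valores : List String) : List String :=
  valores.foldl (fun salida item =>
    pvFlush (item.toList.foldl pvScanStep (salida, []))) []

-- ===== PRECONDITION & SPEC =====
def Spec_normalizar_lista_entrada_py (valores : List String) (out : List String) : Prop := out = normalizar_lista_entrada_py_alt valores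
instance (valores : List String) (out : List String) : Decidable (Spec_normalizar_lista_entrada_py valores out) := by unfold Spec_normalizar_lista_entrada_py; infer_instance

-- ===== CLAIM (what is proved, stated in full; the proofs are below) =====
def Claim_equal_normalizar_lista_entrada_py : Prop := ∀ (valores : List String), Dom_normalizar_lista_entrada_py valores → Spec_normalizar_lista_entrada_py valores (normalizar_lista_entrada_py valores)

-- ===== LEMMAS AND PROOFS =====

-- PySem.Chars.replace with a one-char pattern and one-char replacement is a character map
theorem pv_replace_go_single (o n : Char) :
    ∀ (fuel : Nat) (l acc : List Char), l.length ≤ fuel →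
      PySem.Chars.replace.go [o] [n] fuel l acc
        = acc.reverse ++ l.map (fun c => if c = o then n else c) := by
  intro fuel
  induction fuel with
  | zero => intro l acc h; simp at h; simp [h, PySem.Chars.replace.go]
  | succ f ih =>
    intro l acc h
    cases l with
    | nil => simp [PySem.Chars.replace.go]
    | cons c t =>
      simp only [PySem.Chars.replace.go]
      by_cases hc : c = o
      · simp [hc, List.isPrefixOf, ih t _ (by simpa using h)]
      · simp [List.isPrefixOf, hc, Ne.symm hc, ih t _ (by simpa using h)]

theorem pv_replace_single (o n : Char) (l : List Char) :
    PySem.Chars.replace l [o] [n] = l.map (fun c => if c = o then n else c) := by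
  simpa [PySem.Chars.replace] using pv_replace_go_single o n l.length l []

-- PySem.Chars.splitOn with a one-char separator is Mathlib's List.splitOn
theorem pv_splitOn_go_single (c : Char) :
    ∀ (fuel : Nat) (l cur : List Char) (acc : List (List Char)), l.length < fuel → c ∉ cur →
      PySem.Chars.splitOn.go [c] fuel l cur acc
        = acc.reverse ++ (cur.reverse ++ l).splitOn c := by
  intro fuel
  induction fuel with
  | zero => intro l cur acc h _; omega
  | succ f ih =>
    intro l cur acc h hcur
    cases l with
    | nil =>
      simp only [PySem.Chars.splitOn.go, List.append_nil]
      rw [List.splitOn, List.splitOnP_eq_single]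
      · simp
      · intro x hx
        simp only [List.mem_reverse] at hx
        simp only [beq_iff_eq]
        intro h'; subst h'; exact hcur hx
    | cons ch t =>
      simp only [PySem.Chars.splitOn.go]
      by_cases hc : ch = c
      · subst hc
        rw [if_pos (by simp [List.isPrefixOf])]
        simp only [List.length_cons, List.length_nil, Nat.zero_add, List.drop_succ_cons, List.drop_zero]
        rw [ih t [] _ (by simpa using h) (by simp)]
        have hfree : ∀ x ∈ cur.reverse, ¬ ((x == ch) = true) := by
          intro x hx
          simp only [List.mem_reverse] at hx; simp only [beq_iff_eq]
          intro h'; subst h'; exact hcur hx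
        simp only [List.splitOn]
        rw [List.splitOnP_first (· == ch) cur.reverse hfree ch (by simp) t]
        simp
      · rw [if_neg (by simp [List.isPrefixOf, Ne.symm hc])]
        rw [ih t (ch :: cur) acc (by simpa using h)
             (by simp only [List.mem_cons, not_or]; exact ⟨fun h' => hc h'.symm, hcur⟩)]
        simp

theorem pv_splitOn_single (c : Char) (l : List Char) :
    PySem.Chars.splitOn l [c] = l.splitOn c := by
  simpa [PySem.Chars.splitOn] using pv_splitOn_go_single c (l.length + 1) l [] [] (by omega) (by simp)

-- abbreviation used only by the proofs: strip the pieces, keep the non-empty ones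
def pvOut (pieces : List (List Char)) : List String :=
  (pieces.filter (fun p => decide (PySem.Chars.strip p ≠ []))).map
    (fun p => String.ofList (PySem.Chars.strip p))

def pvSub (c : Char) : Char := if c = ';' then ',' else c

-- pvSub fixes every list without ';'
theorem pv_map_sub_id (buf : List Char) (h2 : ';' ∉ buf) : buf.map pvSub = buf := by
  induction buf with
  | nil => rfl
  | cons c t ih =>
    simp only [List.mem_cons, not_or] at h2
    simp [pvSub, Ne.symm h2.1, ih h2.2]

theorem pv_out_append (x y : List (List Char)) : pvOut (x ++ y) = pvOut x ++ pvOut y := by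
  simp [pvOut]

-- splitting a delimiter-free list is the singleton
theorem pv_splitOn_eq_single (c : Char) (l : List Char) (h : c ∉ l) : l.splitOn c = [l] := by
  rw [List.splitOn, List.splitOnP_eq_single]
  intro x hx
  simp only [beq_iff_eq]; intro h'; subst h'; exact h hx

-- splitOn distributes over an occurrence of the separator
theorem pv_splitOn_append_cons (c : Char) (x y : List Char) :
    (x ++ c :: y).splitOn c = x.splitOn c ++ y.splitOn c := by
  simp only [List.splitOn]
  rw [List.splitOnP_append_cons (· == c) x _ c (by simp)]

-- the character scan computes exactly A's strip-and-filter of the comma split of the ';'→',' image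
theorem pv_scan (l : List Char) : ∀ (buf : List Char) (salida : List String),
    (',' ∉ buf) → (';' ∉ buf) →
    pvFlush (l.foldl pvScanStep (salida, buf))
      = salida ++ pvOut (((buf ++ l).map pvSub).splitOn ',') := by
  induction l with
  | nil =>
    intro buf salida h1 h2
    have hmap : buf.map pvSub = buf := pv_map_sub_id buf h2
    simp only [List.foldl_nil, List.append_nil, hmap]
    rw [pv_splitOn_eq_single ',' buf h1]
    simp only [pvFlush, pvOut, List.filter]
    by_cases ht : PySem.Chars.strip buf ≠ [] <;> simp [ht]
  | cons ch t ih =>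
    intro buf salida h1 h2
    by_cases hd : ch = ',' ∨ ch = ';'
    · have hsub : pvSub ch = ',' := by rcases hd with h | h <;> simp [h, pvSub]
      simp only [List.foldl_cons, pvScanStep, if_pos hd]
      rw [ih [] _ (by simp) (by simp)]
      have : (buf ++ ch :: t).map pvSub = (buf.map pvSub) ++ ',' :: (t.map pvSub) := by
        simp [hsub]
      rw [this]
      have hmap : buf.map pvSub = buf := pv_map_sub_id buf h2
      rw [hmap, pv_splitOn_append_cons, pv_splitOn_eq_single ',' buf h1, pv_out_append]
      simp only [pvOut, List.filter, List.nil_append]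
      by_cases ht : PySem.Chars.strip buf ≠ [] <;> simp [ht]
    · push Not at hd
      simp only [List.foldl_cons, pvScanStep, if_neg (by tauto : ¬ (ch = ',' ∨ ch = ';'))]
      rw [ih (buf ++ [ch]) _
            (by simp only [List.mem_append, List.mem_singleton]; rintro (h | h); exact h1 h; exact hd.1 h.symm)
            (by simp only [List.mem_append, List.mem_singleton]; rintro (h | h); exact h2 h; exact hd.2 h.symm)]
      simp

-- A in flatten form
theorem pv_A_flatMap (valores : List String) :
    normalizar_lista_entrada_py valores
      = valores.flatMap (fun item => pvOut ((item.toList.map pvSub).splitOn ',')) := by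
  unfold normalizar_lista_entrada_py
  simp only [pv_replace_single, pv_splitOn_single]
  simp only [PySem.List.foldl_append_ite (p := fun p => PySem.Chars.strip p ≠ [])
               (f := fun p => String.ofList (PySem.Chars.strip p))]
  rw [PySem.List.foldl_append_eq_flatMap]
  unfold pvOut pvSub
  simp

theorem pv_main (valores : List String) :
    normalizar_lista_entrada_py valores = normalizar_lista_entrada_py_alt valores := by
  rw [pv_A_flatMap]
  unfold normalizar_lista_entrada_py_alt
  have : ∀ (salida : List String) (item : String),
      pvFlush (item.toList.foldl pvScanStep (salida, []))
        = salida ++ pvOut ((item.toList.map pvSub).splitOn ',') := by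
    intro salida item
    simpa using pv_scan item.toList [] salida (by simp) (by simp)
  simp only [this]
  rw [PySem.List.foldl_append_eq_flatMap]
  simp

-- ===== VERDICT (by name: the statement is the Claim_ definition above) =====
theorem normalizar_lista_entrada_py_spec : Claim_equal_normalizar_lista_entrada_py := by
  intro valores _
  exact pv_main valores
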